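-- pv_equiv track=rewrite | github.com/nathan-yan/DeltaGo | extract.py | find
-- ===== SOURCE A (Python) =====
-- def find(s, substring, br = 1):
--     b = 0
--     idx = []
--     l = len(substring)
--     for i in range (len(s) - 3):
--         if s[i : i + l] == substring:
--             b += 1
--             idx.append(i)
--
--             if b == br:
--                 return idx
--
--     return idx
-- ===== SOURCE B (Python) =====
-- def find(s, substring, br = 1):
--     # Jump between occurrences with str.find instead of slicing at every index.
--     idx = []
--     limit = len(s) - 3
--     pos = 0
--     while pos < limit:
--         j = s.find(substring, pos)
--         if j == -1 or j >= limit: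
--             break
--         idx.append(j)
--         if len(idx) == br:
--             return idx
--         pos = j + 1
--     return idx
-- ===== Notes on version B (the rewrite author's own statement) =====
-- stated objective: faster
-- what changed: Instead of slicing and comparing s[i:i+l]==substring at every index, B jumps from occurrence to occurrence with str.find(substring, pos), so indices without a match are skipped by the C-level scanner.
import Mathlib
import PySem

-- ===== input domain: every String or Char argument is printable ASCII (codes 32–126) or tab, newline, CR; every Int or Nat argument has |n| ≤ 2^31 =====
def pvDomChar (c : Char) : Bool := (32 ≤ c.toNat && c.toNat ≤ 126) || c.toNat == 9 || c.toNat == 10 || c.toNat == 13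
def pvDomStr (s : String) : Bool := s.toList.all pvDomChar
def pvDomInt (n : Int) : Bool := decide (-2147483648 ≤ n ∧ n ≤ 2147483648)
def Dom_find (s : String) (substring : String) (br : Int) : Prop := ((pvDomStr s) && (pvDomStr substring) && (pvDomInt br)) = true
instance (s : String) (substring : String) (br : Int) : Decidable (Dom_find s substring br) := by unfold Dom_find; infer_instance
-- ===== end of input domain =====

-- B replaces the per-index slice comparison by jumping between occurrences with str.find (faster in a timing run's constant-factor measurement).


-- ===== PORT A =====
-- A's for-loop over range(len(s)-3) with counter b and early return when b == br.
def pvGoA (sc sub : List Char) (l : Nat) (br : Int) : Nat → Nat → Int → List Int → List Int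
  | _, 0, _, idx => idx
  | i, f+1, b, idx =>
    if PySem.List.slice sc (some (i : Int)) (some ((i : Int) + (l : Int))) = sub then
      let b' := b + 1
      let idx' := idx ++ [(i : Int)]
      if b' = br then idx' else pvGoA sc sub l br (i+1) f b' idx'
    else pvGoA sc sub l br (i+1) f b idx

def find (s : String) (substring : String) (br : Int) : List Int :=
  pvGoA s.toList substring.toList substring.toList.length br 0 (s.toList.length - 3) 0 []

-- ===== PORT B =====
-- B's while loop: pos jumps to the next occurrence found by s.find(substring, pos); fuel = limit bounds the iterations.
def pvGoB (sc sub : List Char) (limit : Nat) (br : Int) : Nat → List Int → Nat → List Int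
  | _, idx, 0 => idx
  | pos, idx, f+1 =>
    if pos < limit then
      let j := PySem.Chars.findFrom sc sub (pos : Int) none
      if j = -1 ∨ (limit : Int) ≤ j then idx
      else
        let idx' := idx ++ [j]
        if (idx'.length : Int) = br then idx' else pvGoB sc sub limit br (j.toNat + 1) idx' f
    else idx

def find_alt (s : String) (substring : String) (br : Int) : List Int :=
  let limit := s.toList.length - 3
  pvGoB s.toList substring.toList limit br 0 [] limit

-- ===== PRECONDITION & SPEC =====
def Spec_find (s : String) (substring : String) (br : Int) (out : List Int) : Prop := out = find_alt s substring br
instance (s : String) (substring : String) (br : Int) (out : List Int) : Decidable (Spec_find s substring br out) := by unfold Spec_find; infer_instance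

-- ===== CLAIM (what is proved, stated in full; the proofs are below) =====
def Claim_equal_find : Prop := ∀ (s : String) (substring : String) (br : Int), Dom_find s substring br → Spec_find s substring br (find s substring br)

-- ===== LEMMAS AND PROOFS =====

-- reference value: the match positions in [i, i+n), in order
def pvM (sc sub : List Char) (i n : Nat) : List Nat :=
  (List.range' i n).filter (fun k => decide (sub <+: sc.drop k))

def pvRef (sc sub : List Char) (br : Int) (b0 : Nat) (i n : Nat) : List Int :=
  (if br ≤ (b0 : Int) then pvM sc sub i n
   else (pvM sc sub i n).take (br - (b0 : Int)).toNat).map (fun k => (k : Int))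

lemma pvMatch_iff (sc sub : List Char) (i : Nat) :
    (PySem.List.slice sc (some (i : Int)) (some ((i : Int) + (sub.length : Int))) = sub)
      ↔ sub <+: sc.drop i := by
  rw [PySem.List.slice_natCast_add]
  constructor
  · intro h; exact h ▸ List.take_prefix _ _
  · intro h; exact (List.prefix_iff_eq_take.mp h).symm

lemma pvM_succ (sc sub : List Char) (i n : Nat) :
    pvM sc sub i (n+1)
      = (if sub <+: sc.drop i then [i] else []) ++ pvM sc sub (i+1) n := by
  simp [pvM, List.range'_succ, List.filter_cons]
  split_ifs <;> simp

lemma pvGoA_eq (sc sub : List Char) (br : Int) (f : Nat) :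
    ∀ (i : Nat) (idx : List Int),
      pvGoA sc sub sub.length br i f (idx.length : Int) idx
        = idx ++ pvRef sc sub br idx.length i f := by
  induction f with
  | zero => intro i idx; simp [pvGoA, pvRef, pvM]
  | succ f ih =>
    intro i idx
    rw [pvGoA]
    by_cases hm : sub <+: sc.drop i
    · rw [if_pos ((pvMatch_iff sc sub i).mpr hm)]
      by_cases hbr : (idx.length : Int) + 1 = br
      · rw [if_pos hbr]
        have hnle : ¬ br ≤ (idx.length : Int) := by omega
        have h1 : (br - (idx.length : Int)).toNat = 1 := by omega
        simp [pvRef, pvM_succ, hm, hnle, h1]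
      · rw [if_neg hbr]
        have hrec := ih (i+1) (idx ++ [(i : Int)])
        simp only [List.length_append, List.length_cons, List.length_nil, Nat.zero_add,
          Nat.cast_add, Nat.cast_one] at hrec
        rw [hrec]
        simp only [pvRef, pvM_succ, hm, if_true, List.append_assoc]
        congr 1
        push_cast
        by_cases hle : br ≤ (idx.length : Int) + 1
        · have h0 : br ≤ (idx.length : Int) := by omega
          simp [hle, h0]
        · have h0 : ¬ br ≤ (idx.length : Int) := by omega
          have ht : (br - (idx.length : Int)).toNat = (br - ((idx.length : Int) + 1)).toNat + 1 := by omega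
          simp [hle, h0, ht]
    · rw [if_neg (fun hc => hm ((pvMatch_iff sc sub i).mp hc))]
      rw [ih (i+1) idx]
      simp [pvRef, pvM_succ, hm]

lemma pvM_empty_of_no_match (sc sub : List Char) (i n : Nat)
    (h : ∀ k, i ≤ k → k < i + n → ¬ sub <+: sc.drop k) :
    pvM sc sub i n = [] := by
  apply List.filter_eq_nil_iff.mpr
  intro k hk
  have := List.mem_range'_1.mp hk
  simpa using h k this.1 this.2

lemma pvGoB_eq (sc sub : List Char) (limit : Nat) (hlim : limit ≤ sc.length) (br : Int) (f : Nat) :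
    ∀ (pos : Nat) (idx : List Int), limit - pos ≤ f →
      pvGoB sc sub limit br pos idx f
        = idx ++ pvRef sc sub br idx.length pos (limit - pos) := by
  induction f with
  | zero =>
    intro pos idx hf
    have : limit - pos = 0 := by omega
    simp [pvGoB, this, pvRef, pvM]
  | succ f ih =>
    intro pos idx hf
    rw [pvGoB]
    by_cases hpl : pos < limit
    · rw [if_pos hpl]
      have hk : pos ≤ sc.length := by omega
      set j := PySem.Chars.findFrom sc sub (pos : Int) none with hj
      by_cases hneg : j = -1
      · rw [if_pos (Or.inl hneg)]
        have hnoin : ¬ sub <:+: sc.drop pos :=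
          (PySem.Chars.findFrom_natCast_eq_neg_one_iff sc sub pos hk).mp hneg
        have hM : pvM sc sub pos (limit - pos) = [] := by
          apply pvM_empty_of_no_match
          intro k hk1 _ hp
          apply hnoin
          have : sc.drop k = (sc.drop pos).drop (k - pos) := by
            rw [List.drop_drop]; congr 1; omega
          rw [this] at hp
          exact hp.isInfix.trans (List.drop_suffix (k - pos) (sc.drop pos)).isInfix
        simp [pvRef, hM]
      · obtain ⟨hle, hpref, hmin⟩ := PySem.Chars.findFrom_natCast_spec sc sub pos hk hneg
        rw [← hj] at hle hpref hmin
        by_cases hlimj : (limit : Int) ≤ j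
        · rw [if_pos (Or.inr hlimj)]
          have hM : pvM sc sub pos (limit - pos) = [] := by
            apply pvM_empty_of_no_match
            intro k hk1 hk2 hp
            exact hmin k hk1 (by omega) hp
          simp [pvRef, hM]
        · rw [if_neg (by tauto)]
          have hjnn : 0 ≤ j := le_trans (by exact_mod_cast Nat.zero_le pos) hle
          have hjlt : j.toNat < limit := by omega
          have hjge : pos ≤ j.toNat := by omega
          -- split the match list at j.toNat
          have hM : pvM sc sub pos (limit - pos)
              = j.toNat :: pvM sc sub (j.toNat + 1) (limit - (j.toNat + 1)) := by
            have e1 : pos + 1 * (j.toNat - pos) = j.toNat := by omega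
            have e2 : (j.toNat - pos) + (limit - j.toNat) = limit - pos := by omega
            have hsplit : List.range' pos (limit - pos)
                = List.range' pos (j.toNat - pos) ++ List.range' j.toNat (limit - j.toNat) := by
              rw [← e2, ← List.range'_append, e1]
            unfold pvM
            rw [hsplit, List.filter_append]
            have h1 : (List.range' pos (j.toNat - pos)).filter (fun k => decide (sub <+: sc.drop k)) = [] := by
              apply List.filter_eq_nil_iff.mpr
              intro k hkmem
              have := List.mem_range'_1.mp hkmem
              simpa using hmin k this.1 (by omega)
            rw [h1, List.nil_append]
            rw [show limit - j.toNat = (limit - (j.toNat + 1)) + 1 by omega, List.range'_succ, List.filter_cons]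
            simp [hpref]
          show (if (((idx ++ [j]).length : Nat) : Int) = br then idx ++ [j]
                else pvGoB sc sub limit br (j.toNat + 1) (idx ++ [j]) f)
              = idx ++ pvRef sc sub br idx.length pos (limit - pos)
          by_cases hbr : ((idx ++ [j]).length : Int) = br
          · rw [if_pos hbr]
            simp only [List.length_append, List.length_cons, List.length_nil, Nat.zero_add,
              Nat.cast_add, Nat.cast_one] at hbr
            have hnle : ¬ br ≤ (idx.length : Int) := by omega
            have h1 : (br - (idx.length : Int)).toNat = 1 := by omega
            have hjeq : (j.toNat : Int) = j := Int.toNat_of_nonneg hjnn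
            simp [pvRef, hM, hnle, h1, hjeq]
          · rw [if_neg hbr]
            simp only [List.length_append, List.length_cons, List.length_nil, Nat.zero_add,
              Nat.cast_add, Nat.cast_one] at hbr
            have hrec := ih (j.toNat + 1) (idx ++ [j]) (by omega)
            simp only [List.length_append, List.length_cons, List.length_nil,
              Nat.zero_add] at hrec
            rw [hrec]
            simp only [pvRef, hM, List.append_assoc]
            congr 1
            push_cast
            have hjeq : (j.toNat : Int) = j := Int.toNat_of_nonneg hjnn
            by_cases hle : br ≤ (idx.length : Int) + 1
            · have h0 : br ≤ (idx.length : Int) := by omega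
              simp [hle, h0, hjeq]
            · have h0 : ¬ br ≤ (idx.length : Int) := by omega
              have ht : (br - (idx.length : Int)).toNat = (br - ((idx.length : Int) + 1)).toNat + 1 := by omega
              simp [hle, h0, ht, hjeq]
    · rw [if_neg hpl]
      have : limit - pos = 0 := by omega
      simp [this, pvRef, pvM]

-- ===== VERDICT (by name: the statement is the Claim_ definition above) =====
theorem find_spec : Claim_equal_find := by
  intro s substring br _
  unfold Spec_find find find_alt
  have hA := pvGoA_eq s.toList substring.toList br (s.toList.length - 3) 0 []
  have hB := pvGoB_eq s.toList substring.toList (s.toList.length - 3) (by omega) br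
      (s.toList.length - 3) 0 [] (by omega)
  simp only [List.length_nil, Nat.cast_zero, Nat.sub_zero] at hA hB
  rw [hA, hB]
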